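-- pv_equiv track=rewrite | github.com/Odder/advent-of-code | 24/24.py | stormy
-- ===== SOURCE A (Python) =====
-- from collections import deque, defaultdict
--
-- def stormy(grid, storms):
--     max_i, max_j = grid
--     new_storms = defaultdict(list)
--     for cell in storms:
--         while storms[cell]:
--             storm = storms[cell].pop()
--             if storm == '<':
--                 new_storms[cell[0], (((cell[1] - 2) % (max_j - 2)) + 1)].append(storm)
--             if storm == '>':
--                 new_storms[cell[0], ((cell[1] % (max_j - 2)) + 1)].append(storm)
--             if storm == '^':
--                 new_storms[((cell[0] - 2) % (max_i - 2)) + 1, cell[1]].append(storm)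
--             if storm == 'v':
--                 new_storms[(cell[0] % (max_i - 2)) + 1, cell[1]].append(storm)
--     return new_storms
-- ===== SOURCE B (Python) =====
-- from collections import defaultdict
--
-- _MOVES = {'<': (0, -1), '>': (0, 1), '^': (-1, 0), 'v': (1, 0)}
--
-- def stormy(grid, storms):
--     max_i, max_j = grid
--     # phase 1: flatten every cell's storms (last-in-first-out order, as pop() yields)
--     # into one list of (cell, delta, char) records, dropping non-arrow chars
--     placed = [((i, j), _MOVES[s], s)
--               for (i, j), chars in storms.items()
--               for s in reversed(chars) if s in _MOVES]
--     # phase 2: one uniform wrap formula places every record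
--     new_storms = defaultdict(list)
--     for (i, j), (di, dj), s in placed:
--         ni = (i - 1 + di) % (max_i - 2) + 1 if di else i
--         nj = (j - 1 + dj) % (max_j - 2) + 1 if dj else j
--         new_storms[ni, nj].append(s)
--     return new_storms
-- ===== Notes on version B (the rewrite author's own statement) =====
-- stated objective: simpler
-- what changed: Replaces the four direction if-branches and the while/pop mutation loop by a delta table with one uniform wrap formula, split into a flatten phase (one comprehension collecting (cell, delta, char) records in pop order) and a single placement loop; B does not mutate the input dict's lists.
import Mathlib
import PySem

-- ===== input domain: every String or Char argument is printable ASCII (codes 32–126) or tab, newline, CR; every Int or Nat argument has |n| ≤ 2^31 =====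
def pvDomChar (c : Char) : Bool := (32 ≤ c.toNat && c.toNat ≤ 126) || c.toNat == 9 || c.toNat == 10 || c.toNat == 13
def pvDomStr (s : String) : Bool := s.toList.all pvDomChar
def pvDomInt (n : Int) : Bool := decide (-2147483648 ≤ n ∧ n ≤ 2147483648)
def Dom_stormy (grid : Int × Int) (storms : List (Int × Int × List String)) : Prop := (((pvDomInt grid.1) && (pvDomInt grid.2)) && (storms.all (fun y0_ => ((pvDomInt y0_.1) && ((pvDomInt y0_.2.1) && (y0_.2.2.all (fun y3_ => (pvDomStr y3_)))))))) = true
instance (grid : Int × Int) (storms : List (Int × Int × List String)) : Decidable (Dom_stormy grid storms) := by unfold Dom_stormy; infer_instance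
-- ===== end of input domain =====

-- B replaces A's four direction branches by a delta table and one uniform wrap formula, and splits
-- the work into a flatten phase and a uniform placement phase (objective: simpler).
-- Equivalence is about the RETURN value only: Python A empties the lists inside `storms` in place
-- (while/pop); B does not mutate its input.

-- ===== PORT A =====
-- defaultdict(list)[k].append(s)
def pvPush (d : PySem.Dict (Int × Int) (List String)) (k : Int × Int) (s : String) :
    PySem.Dict (Int × Int) (List String) :=
  d.modify k [] (· ++ [s])

-- the body of A's while-loop for one popped storm character (the four ifs, in order)
def pvStepA (maxI maxJ i j : Int) (d : PySem.Dict (Int × Int) (List String)) (s : String) :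
    PySem.Dict (Int × Int) (List String) :=
  let d := if s == "<" then pvPush d (i, PySem.Int.mod (j - 2) (maxJ - 2) + 1) s else d
  let d := if s == ">" then pvPush d (i, PySem.Int.mod j (maxJ - 2) + 1) s else d
  let d := if s == "^" then pvPush d (PySem.Int.mod (i - 2) (maxI - 2) + 1, j) s else d
  if s == "v" then pvPush d (PySem.Int.mod i (maxI - 2) + 1, j) s else d

-- while storms[cell]: pop() consumes the cell's list from its END: fold over the reversed list
def stormy (grid : Int × Int) (storms : List (Int × Int × List String)) :
    List (Int × Int × List String) :=
  let new := storms.foldl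
    (fun d e => e.2.2.reverse.foldl (pvStepA grid.1 grid.2 e.1 e.2.1) d)
    PySem.Dict.empty
  new.items.map (fun p => (p.1.1, p.1.2, p.2))

-- ===== PORT B =====
-- the _MOVES delta table (membership test + lookup = one Option-valued lookup)
def pvMoveDelta (s : String) : Option (Int × Int) :=
  if s == "<" then some (0, -1)
  else if s == ">" then some (0, 1)
  else if s == "^" then some (-1, 0)
  else if s == "v" then some (1, 0)
  else none

-- phase-2 loop body: one uniform wrap formula, record = (cell, delta, char)
def pvPlaceB (maxI maxJ : Int) (d : PySem.Dict (Int × Int) (List String))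
    (r : (Int × Int) × (Int × Int) × String) : PySem.Dict (Int × Int) (List String) :=
  let ni := if r.2.1.1 == 0 then r.1.1 else PySem.Int.mod (r.1.1 - 1 + r.2.1.1) (maxI - 2) + 1
  let nj := if r.2.1.2 == 0 then r.1.2 else PySem.Int.mod (r.1.2 - 1 + r.2.1.2) (maxJ - 2) + 1
  d.modify (ni, nj) [] (· ++ [r.2.2])

def stormy_alt (grid : Int × Int) (storms : List (Int × Int × List String)) :
    List (Int × Int × List String) :=
  let placed := storms.flatMap
    (fun e => e.2.2.reverse.filterMap
      (fun s => (pvMoveDelta s).map (fun dd => ((e.1, e.2.1), dd, s))))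
  let new := placed.foldl (pvPlaceB grid.1 grid.2) PySem.Dict.empty
  new.items.map (fun p => (p.1.1, p.1.2, p.2))

-- ===== PRECONDITION & SPEC =====
-- Pre_ excludes exactly the inputs on which Python A raises ZeroDivisionError: a horizontal
-- storm with max_j = 2, or a vertical storm with max_i = 2 (the wrap modulus is zero there).
def Pre_stormy (grid : Int × Int) (storms : List (Int × Int × List String)) : Prop :=
  (grid.2 = 2 → ∀ e ∈ storms, ∀ s ∈ e.2.2, s ≠ "<" ∧ s ≠ ">") ∧
  (grid.1 = 2 → ∀ e ∈ storms, ∀ s ∈ e.2.2, s ≠ "^" ∧ s ≠ "v")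
instance (grid : Int × Int) (storms : List (Int × Int × List String)) : Decidable (Pre_stormy grid storms) := by unfold Pre_stormy; infer_instance

def pvWitness_stormy : (Int × Int) × (List (Int × Int × List String)) :=
  ((6, 6), [(1, 1, ["<", "v"]), (2, 3, [">", "^", "."])])

def Spec_stormy (grid : Int × Int) (storms : List (Int × Int × List String)) (out : List (Int × Int × List String)) : Prop := out = stormy_alt grid storms
instance (grid : Int × Int) (storms : List (Int × Int × List String)) (out : List (Int × Int × List String)) : Decidable (Spec_stormy grid storms out) := by unfold Spec_stormy; infer_instance

-- ===== CLAIM (what is proved, stated in full; the proofs are below) =====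
def Claim_equal_stormy : Prop := ∀ (grid : Int × Int) (storms : List (Int × Int × List String)), Dom_stormy grid storms → Pre_stormy grid storms → Spec_stormy grid storms (stormy grid storms)

-- ===== LEMMAS AND PROOFS =====

-- per-character: B's delta-table lookup and uniform placement equal A's branch chain
theorem pvStep_none (maxI maxJ i j : Int) (d : PySem.Dict (Int × Int) (List String)) (s : String)
    (hm : pvMoveDelta s = none) : pvStepA maxI maxJ i j d s = d := by
  have h1 : s ≠ "<" := by intro h; subst h; simp [pvMoveDelta] at hm
  have h2 : s ≠ ">" := by intro h; subst h; simp [pvMoveDelta] at hm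
  have h3 : s ≠ "^" := by intro h; subst h; simp [pvMoveDelta] at hm
  have h4 : s ≠ "v" := by intro h; subst h; simp [pvMoveDelta] at hm
  simp [pvStepA, h1, h2, h3, h4]

theorem pvStep_some (maxI maxJ i j : Int) (d : PySem.Dict (Int × Int) (List String)) (s : String)
    (dd : Int × Int) (hm : pvMoveDelta s = some dd) :
    pvStepA maxI maxJ i j d s = pvPlaceB maxI maxJ d ((i, j), dd, s) := by
  by_cases h1 : s = "<"
  · subst h1
    simp [pvMoveDelta] at hm
    subst hm
    simp [pvStepA, pvPlaceB, pvPush]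
    try ring_nf
  by_cases h2 : s = ">"
  · subst h2
    simp [pvMoveDelta] at hm
    subst hm
    simp [pvStepA, pvPlaceB, pvPush]
    try ring_nf
  by_cases h3 : s = "^"
  · subst h3
    simp [pvMoveDelta] at hm
    subst hm
    simp [pvStepA, pvPlaceB, pvPush]
    try ring_nf
  by_cases h4 : s = "v"
  · subst h4
    simp [pvMoveDelta] at hm
    subst hm
    simp [pvStepA, pvPlaceB, pvPush]
    try ring_nf
  · simp [pvMoveDelta, h1, h2, h3, h4] at hm

-- per-cell: folding B's placement over the filtered records equals folding A's step over the chars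
theorem pvInner_eq (maxI maxJ i j : Int) (l : List String)
    (d : PySem.Dict (Int × Int) (List String)) :
    (l.filterMap (fun s => (pvMoveDelta s).map (fun dd => ((i, j), dd, s)))).foldl
        (pvPlaceB maxI maxJ) d
      = l.foldl (pvStepA maxI maxJ i j) d := by
  induction l generalizing d with
  | nil => rfl
  | cons s t ih =>
    rw [List.filterMap_cons]
    cases hm : pvMoveDelta s with
    | none =>
      simp only [Option.map_none, List.foldl_cons, ih, pvStep_none maxI maxJ i j d s hm]
    | some dd =>
      simp only [Option.map_some, List.foldl_cons, ih, pvStep_some maxI maxJ i j d s dd hm]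

-- ===== VERDICT (by name: the statement is the Claim_ definition above) =====
theorem stormy_spec : Claim_equal_stormy := by
  intro grid storms _ _
  unfold Spec_stormy stormy stormy_alt
  dsimp only
  rw [List.foldl_flatMap]
  congr 2
  apply List.foldl_ext
  intro d e _
  exact (pvInner_eq grid.1 grid.2 e.1 e.2.1 e.2.2.reverse d).symm
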